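-- pv_equiv track=rewrite | github.com/sghpjuikit/player | app/speech-recognition-whisper/util_itr.py | skipThinking
-- ===== SOURCE A (Python) =====
-- def lines(input_generator):
--     """
--     Takes a generator of strings and returns a generator of lines,
--     accumulating text until a '\n' is found, then yielding the line.
--     Repeats this process until all lines are returned.
--     """
--     return chunks(input_generator, '\n')
--
-- def linesWithNewline(chunk_generator):
--     first = True
--     for chunk in lines(chunk_generator):
--         if not first: yield '\n'
--         first = False
--         yield chunk
--
-- def chunks(input_generator, separator: str):
--     """
--     Takes a generator of strings and returns a generator of strings,
--     accumulating text until a separator is found, then yielding the text chunk.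
--     Repeats this process until all chunks are returned.
--     """
--     chunk = ""
--     for chunk_part in input_generator:
--         chunk += chunk_part
--         while separator in chunk:
--             i = chunk.find(separator)
--             yield chunk[:i]
--             chunk = chunk[i+1:]
--     if chunk:
--         yield chunk
--
-- def skipThinking(chunk_generator):
--     """
--     Processes a stream of Python code chunks. If the stream starts with a
--     '<think>' chunk, it wraps subsequent chunks in think("chunk") until it
--     encounters a '</think>' chunk. The '<think>' and '</think>' chunks are
--     removed from the output stream.
--     """
--     thinking = False
--     for chunk in linesWithNewline(chunk_generator):
--         if not thinking:
--             if chunk == "<think>":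
--                 thinking = True
--             else:
--                 yield chunk
--         else:
--             if chunk == "</think>":
--                 thinking = False
--             else:
--                 pass
-- ===== SOURCE B (Python) =====
-- # Single pass over the characters with a persistent line buffer: no repeated
-- # find+slice re-scanning of the accumulated chunk (O(n) instead of O(n^2)).
-- def skipThinking(chunk_generator):
--     buf = []
--     thinking = False
--     first = True
--
--     def flush(line):
--         nonlocal thinking, first
--         out = []
--         if not first and not thinking:
--             out.append('\n')
--         first = False
--         if thinking:
--             if line == '</think>':
--                 thinking = False
--         elif line == '<think>':
--             thinking = True
--         else:
--             out.append(line)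
--         return out
--
--     for part in chunk_generator:
--         for ch in part:
--             if ch == '\n':
--                 yield from flush(''.join(buf))
--                 buf.clear()
--             else:
--                 buf.append(ch)
--     if buf:
--         yield from flush(''.join(buf))
-- ===== Notes on version B (the rewrite author's own statement) =====
-- stated objective: faster
-- what changed: B makes a single character-level pass over the stream with a persistent line buffer instead of A's generator pipeline that repeatedly re-scans (find) and re-slices a growing accumulated chunk.
import Mathlib
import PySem

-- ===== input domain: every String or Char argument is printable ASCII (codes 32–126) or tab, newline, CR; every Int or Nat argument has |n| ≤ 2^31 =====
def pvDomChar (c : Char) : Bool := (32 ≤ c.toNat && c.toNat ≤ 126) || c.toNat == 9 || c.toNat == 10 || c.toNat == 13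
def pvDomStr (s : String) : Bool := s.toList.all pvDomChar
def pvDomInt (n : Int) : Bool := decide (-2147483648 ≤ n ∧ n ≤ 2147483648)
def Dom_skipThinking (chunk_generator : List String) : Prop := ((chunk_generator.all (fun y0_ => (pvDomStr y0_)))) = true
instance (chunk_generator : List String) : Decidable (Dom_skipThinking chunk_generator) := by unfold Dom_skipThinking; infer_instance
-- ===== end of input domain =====

-- B replaces A's generator pipeline (repeated find+slice on a growing chunk) with one
-- character-level pass over the stream keeping a persistent line buffer; equivalence
-- is about the returned sequence of yielded strings.

-- ===== PORT A =====
-- A's inner `while separator in chunk` loop of `chunks`, specialised (as in A's only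
-- use, via `lines`) to the separator '\n'; works on the char list of the Python str.
def pvAWhile (cs : List Char) : List (List Char) × List Char :=
  if h : PySem.Chars.isIn ['\n'] cs then
    let i := PySem.Chars.find cs ['\n']
    let r := pvAWhile (PySem.List.slice cs (some (i + 1)) none)
    (PySem.List.slice cs none (some i) :: r.1, r.2)
  else ([], cs)
termination_by cs.length
decreasing_by
  have hinf : ['\n'] <:+: cs := (PySem.Chars.isIn_iff_infix _ _).mp h
  have hpos : 0 ≤ PySem.Chars.find cs ['\n'] := (PySem.Chars.find_nonneg_iff _ _).mpr hinf
  have hne : cs ≠ [] := by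
    rcases hinf with ⟨u, v, huv⟩
    intro hnil; rw [hnil] at huv
    simpa using congrArg List.length huv
  rw [PySem.List.slice_from cs (by omega)]
  have : 0 < cs.length := List.length_pos_iff.mpr hne
  simp only [List.length_drop]
  omega

-- A's `chunks(input_generator, '\n')` (= `lines`): fold the chunk accumulator over
-- the parts, then flush the trailing chunk if nonempty (Python truthiness).
def pvAChunks (parts : List (List Char)) : List (List Char) :=
  let st := parts.foldl
    (fun (st : List (List Char) × List Char) part =>
      let c := st.2 ++ part
      let r := pvAWhile c
      (st.1 ++ r.1, r.2)) ([], [])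
  if st.2.isEmpty then st.1 else st.1 ++ [st.2]

-- A's `linesWithNewline`: first flag, yield '\n' before every chunk but the first.
def pvALwn (ls : List (List Char)) : List (List Char) :=
  (ls.foldl
    (fun (st : Bool × List (List Char)) chunk =>
      if st.1 then (false, st.2 ++ [chunk]) else (false, st.2 ++ [['\n'], chunk])) (true, [])).2

-- A's `skipThinking` loop: thinking flag over the linesWithNewline stream.
def pvAFilter (st : Bool × List (List Char)) (chunk : List Char) : Bool × List (List Char) :=
  if !st.1 then
    if chunk = "<think>".toList then (true, st.2) else (st.1, st.2 ++ [chunk])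
  else
    if chunk = "</think>".toList then (false, st.2) else st

def skipThinking (chunk_generator : List String) : List String :=
  ((pvALwn (pvAChunks (chunk_generator.map String.toList))).foldl pvAFilter (false, [])).2.map
    (fun l => String.ofList l)

-- ===== PORT B =====
-- B's `flush(line)`: items to emit for one completed line, plus the new thinking flag.
def pvBFlush (thinking first : Bool) (line : List Char) : List (List Char) × Bool :=
  let nl : List (List Char) := if !first && !thinking then [['\n']] else []
  if thinking then
    (nl, if line = "</think>".toList then false else true)
  else if line = "<think>".toList then (nl, true)
  else (nl ++ [line], thinking)

-- B's per-character step; state = (out, buf, thinking, first).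
def pvBStep (st : List (List Char) × List Char × Bool × Bool) (c : Char) :
    List (List Char) × List Char × Bool × Bool :=
  if c = '\n' then
    let r := pvBFlush st.2.2.1 st.2.2.2 st.2.1
    (st.1 ++ r.1, [], r.2, false)
  else (st.1, st.2.1 ++ [c], st.2.2.1, st.2.2.2)

def skipThinking_alt (chunk_generator : List String) : List String :=
  let st := chunk_generator.foldl (fun st part => part.toList.foldl pvBStep st)
    ([], [], false, true)
  let fin := if st.2.1.isEmpty then st.1 else st.1 ++ (pvBFlush st.2.2.1 st.2.2.2 st.2.1).1
  fin.map (fun l => String.ofList l)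

-- ===== PRECONDITION & SPEC =====
def Spec_skipThinking (chunk_generator : List String) (out : List String) : Prop := out = skipThinking_alt chunk_generator
instance (chunk_generator : List String) (out : List String) : Decidable (Spec_skipThinking chunk_generator out) := by unfold Spec_skipThinking; infer_instance

-- ===== CLAIM (what is proved, stated in full; the proofs are below) =====
def Claim_equal_skipThinking : Prop := ∀ (chunk_generator : List String), Dom_skipThinking chunk_generator → Spec_skipThinking chunk_generator (skipThinking chunk_generator)

-- ===== LEMMAS AND PROOFS =====

-- Python's text.split('\n') on char lists: every piece, including empty ones.
def pySplit : List Char → List (List Char)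
  | [] => [[]]
  | c :: cs =>
    if c = '\n' then [] :: pySplit cs
    else
      match pySplit cs with
      | [] => [[c]]
      | p :: ps => (c :: p) :: ps

-- The common specification: the lines A's `lines` yields (split, trailing empty piece
-- dropped), then `pvBFlush` folded over them.
def linesSpec (cs : List Char) : List (List Char) :=
  let P := pySplit cs
  if P.getLastD [] = [] then P.dropLast else P

def linesFold (st : List (List Char) × Bool × Bool) (ls : List (List Char)) :
    List (List Char) × Bool × Bool :=
  ls.foldl (fun st l => let r := pvBFlush st.2.1 st.2.2 l; (st.1 ++ r.1, r.2, false)) st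

theorem pySplit_ne_nil (cs : List Char) : pySplit cs ≠ [] := by
  cases cs with
  | nil => simp [pySplit]
  | cons c cs =>
    simp only [pySplit]
    split
    · simp
    · split <;> simp

theorem pySplit_no_nl {cs : List Char} (h : '\n' ∉ cs) : pySplit cs = [cs] := by
  induction cs with
  | nil => rfl
  | cons c cs ih =>
    simp only [List.mem_cons, not_or] at h
    rw [pySplit, if_neg (Ne.symm h.1), ih h.2]

theorem pySplit_cons_sep (u v : List Char) (h : '\n' ∉ u) :
    pySplit (u ++ '\n' :: v) = u :: pySplit v := by
  induction u with
  | nil => simp [pySplit]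
  | cons c u ih =>
    simp only [List.mem_cons, not_or] at h
    rw [List.cons_append, pySplit, if_neg (Ne.symm h.1), ih h.2]

theorem pySplit_append_last (a z : List Char) (ps : List (List Char)) (r : List Char)
    (h : pySplit a = ps ++ [r]) : pySplit (a ++ z) = ps ++ pySplit (r ++ z) := by
  induction a generalizing ps r with
  | nil =>
    simp only [pySplit] at h
    cases ps with
    | nil =>
      simp only [List.nil_append] at h ⊢
      obtain rfl : r = [] := by simpa using h.symm
      simp
    | cons p ps' => simp at h
  | cons c a ih =>
    by_cases hc : c = '\n'
    · subst hc
      simp only [pySplit, reduceIte] at h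
      cases ps with
      | nil =>
        simp only [List.nil_append, List.cons.injEq] at h
        exact absurd h.2 (pySplit_ne_nil a)
      | cons p ps' =>
        rw [List.cons_append, List.cons.injEq] at h
        obtain ⟨hp, h2⟩ := h
        subst hp
        rw [List.cons_append, pySplit, if_pos rfl, ih ps' r h2, List.cons_append]
    · rw [pySplit, if_neg hc] at h
      rcases hps : pySplit a with _ | ⟨p, ps''⟩
      · exact absurd hps (pySplit_ne_nil a)
      · rw [hps] at h
        cases ps with
        | nil =>
          simp only [List.nil_append, List.cons.injEq] at h
          obtain ⟨rfl, rfl⟩ := h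
          -- r = c :: p, pySplit a = [p]
          have ha : pySplit (a ++ z) = pySplit (p ++ z) := by
            simpa using ih [] p (by simpa using hps)
          rw [List.cons_append, pySplit, if_neg hc, ha, List.nil_append,
            List.cons_append, pySplit, if_neg hc]
        | cons q qs =>
          simp only [List.cons_append, List.cons.injEq] at h
          obtain ⟨rfl, h2⟩ := h
          have ha := ih (p :: qs) r (by rw [hps, h2]; rfl)
          rw [List.cons_append, pySplit, if_neg hc, ha]
          rfl

theorem pvAWhile_spec (cs : List Char) :
    pySplit cs = (pvAWhile cs).1 ++ [(pvAWhile cs).2] ∧ '\n' ∉ (pvAWhile cs).2 := by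
  induction cs using pvAWhile.induct with
  | case2 cs h =>
    have hni : '\n' ∉ cs := by
      intro hm
      rcases List.mem_iff_append.mp hm with ⟨u, v, rfl⟩
      exact absurd ((PySem.Chars.isIn_iff_infix _ _).mpr ⟨u, v, rfl⟩) (by simpa using h)
    rw [pvAWhile, dif_neg h]
    exact ⟨pySplit_no_nl hni, hni⟩
  | case1 cs h i ih =>
    have hinf : ['\n'] <:+: cs := (PySem.Chars.isIn_iff_infix _ _).mp h
    have hpos : 0 ≤ PySem.Chars.find cs ['\n'] := (PySem.Chars.find_nonneg_iff _ _).mpr hinf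
    obtain ⟨hpre, hmin⟩ := PySem.Chars.find_spec hpos
    set n := (PySem.Chars.find cs ['\n']).toNat with hn
    have hdrop : cs.drop n = '\n' :: cs.drop (n + 1) := by
      rcases hpre with ⟨t, ht⟩
      rw [← ht, ← List.tail_drop, ← ht]
      rfl
    have hcs : cs = cs.take n ++ '\n' :: cs.drop (n + 1) := by
      conv_lhs => rw [← List.take_append_drop n cs]
      rw [hdrop]
    have htk : '\n' ∉ cs.take n := by
      intro hm
      obtain ⟨j, hj, hje⟩ := List.getElem_of_mem hm
      simp only [List.length_take] at hj
      have hjn : j < n := by omega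
      have hjl : j < cs.length := by omega
      refine hmin j hjn ?_
      rw [List.drop_eq_getElem_cons hjl]
      simp only [List.getElem_take] at hje
      rw [hje]
      exact ⟨_, rfl⟩
    have hslice1 : PySem.List.slice cs (some (PySem.Chars.find cs ['\n'] + 1)) none = cs.drop (n+1) := by
      rw [PySem.List.slice_from cs (by omega)]
      congr 1
      omega
    have hslice2 : PySem.List.slice cs none (some (PySem.Chars.find cs ['\n'])) = cs.take n := by
      rw [PySem.List.slice_to cs hpos]
    rw [pvAWhile, dif_pos h]
    simp only [hslice1, hslice2]
    rw [hslice1] at ih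
    refine ⟨?_, ih.2⟩
    conv_lhs => rw [hcs]
    rw [pySplit_cons_sep _ _ htk, ih.1]
    rfl

theorem getLastD_append_ne (l1 l2 : List (List Char)) (h : l2 ≠ []) : (l1 ++ l2).getLastD [] = l2.getLastD [] := by
  rw [List.getLastD_eq_getLast?, List.getLastD_eq_getLast?, List.getLast?_append_of_ne_nil l1 h]
theorem dropLast_concat_getLastD (l : List (List Char)) (h : l ≠ []) : l.dropLast ++ [l.getLastD []] = l := by
  rcases l with _ | ⟨a, t⟩
  · exact absurd rfl h
  · have h2 : (a :: t).getLast? = some ((a :: t).getLast (by simp)) := List.getLast?_eq_some_getLast (by simp)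
    rw [List.getLastD_eq_getLast?, h2]
    exact List.dropLast_concat_getLast _

theorem pvAChunks_fold (parts : List (List Char)) (acc : List (List Char)) (r : List Char)
    (h : '\n' ∉ r) :
    parts.foldl
      (fun (st : List (List Char) × List Char) part =>
        let c := st.2 ++ part
        let w := pvAWhile c
        (st.1 ++ w.1, w.2)) (acc, r)
      = (acc ++ (pySplit (r ++ parts.flatten)).dropLast,
         (pySplit (r ++ parts.flatten)).getLastD []) := by
  induction parts generalizing acc r with
  | nil => simp [pySplit_no_nl h]
  | cons part parts ih =>
    obtain ⟨hw, hw2⟩ := pvAWhile_spec (r ++ part)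
    have hsp : pySplit ((r ++ part) ++ parts.flatten)
        = (pvAWhile (r ++ part)).1 ++ pySplit ((pvAWhile (r ++ part)).2 ++ parts.flatten) :=
      pySplit_append_last _ _ _ _ hw
    rw [List.foldl_cons]
    refine (ih (acc ++ (pvAWhile (r ++ part)).1) (pvAWhile (r ++ part)).2 hw2).trans ?_
    rw [List.flatten_cons, ← List.append_assoc, hsp,
      List.dropLast_append, getLastD_append_ne _ _ (pySplit_ne_nil _)]
    have he : (pySplit ((pvAWhile (r ++ part)).2 ++ parts.flatten)).isEmpty = false := by
      simpa [List.isEmpty_iff] using pySplit_ne_nil _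
    rw [he]
    simp [List.append_assoc]
theorem pvAChunks_spec (parts : List (List Char)) :
    pvAChunks parts = linesSpec parts.flatten := by
  unfold pvAChunks
  rw [pvAChunks_fold parts [] [] (by simp)]
  simp only [List.nil_append]
  unfold linesSpec
  simp only [List.getLastD_eq_getLast?, List.isEmpty_iff]
  by_cases hl : (pySplit parts.flatten).getLast?.getD [] = []
  · rw [if_pos hl, if_pos hl]
  · rw [if_neg hl, if_neg hl]
    have hd := dropLast_concat_getLastD (pySplit parts.flatten) (pySplit_ne_nil _)
    simpa [List.getLastD_eq_getLast?] using hd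

theorem pvALwn_fold (t : List (List Char)) (acc : List (List Char)) :
    (t.foldl
      (fun (st : Bool × List (List Char)) chunk =>
        if st.1 then (false, st.2 ++ [chunk]) else (false, st.2 ++ [['\n'], chunk]))
      (false, acc)).2
      = acc ++ t.flatMap (fun x => [['\n'], x]) := by
  induction t generalizing acc with
  | nil => simp
  | cons x t ih =>
    rw [List.foldl_cons]
    refine Eq.trans (ih (acc ++ [['\n'], x])) ?_
    simp

theorem pvALwn_spec (l : List Char) (t : List (List Char)) :
    pvALwn (l :: t) = l :: t.flatMap (fun x => [['\n'], x]) := by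
  unfold pvALwn
  rw [List.foldl_cons]
  exact Eq.trans (pvALwn_fold t [l]) (by simp)

theorem pvAFilter_key (th : Bool) (out : List (List Char)) (l : List Char) :
    pvAFilter (pvAFilter (th, out) ['\n']) l
      = ((pvBFlush th false l).2, out ++ (pvBFlush th false l).1) := by
  have e1 : "<think>".toList = ['<', 't', 'h', 'i', 'n', 'k', '>'] := by decide
  have e2 : "</think>".toList = ['<', '/', 't', 'h', 'i', 'n', 'k', '>'] := by decide
  cases th
  · by_cases hl : l = ['<', 't', 'h', 'i', 'n', 'k', '>'] <;>
      simp [pvAFilter, pvBFlush, e1, hl]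
  · by_cases hl : l = ['<', '/', 't', 'h', 'i', 'n', 'k', '>'] <;>
      simp [pvAFilter, pvBFlush, e2, hl]

theorem pvAFilter_flatMap (ls : List (List Char)) (th : Bool) (out : List (List Char)) :
    (ls.flatMap (fun x => [['\n'], x])).foldl pvAFilter (th, out) =
      ((linesFold (out, th, false) ls).2.1, (linesFold (out, th, false) ls).1) := by
  induction ls generalizing th out with
  | nil => rfl
  | cons l ls ih =>
    simp only [List.flatMap_cons, List.cons_append, List.nil_append, List.foldl_cons]
    rw [pvAFilter_key, ih]
    simp [linesFold]

theorem aSide (ls : List (List Char)) :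
    ((pvALwn ls).foldl pvAFilter (false, [])).2 = (linesFold ([], false, true) ls).1 := by
  cases ls with
  | nil => rfl
  | cons l t =>
    rw [pvALwn_spec, List.foldl_cons]
    have h0 : pvAFilter (false, ([] : List (List Char))) l
        = ((pvBFlush false true l).2, [] ++ (pvBFlush false true l).1) := by
      have e1 : "<think>".toList = ['<', 't', 'h', 'i', 'n', 'k', '>'] := by decide
      by_cases hl : l = ['<', 't', 'h', 'i', 'n', 'k', '>'] <;>
        simp [pvAFilter, pvBFlush, e1, hl]
    rw [h0, pvAFilter_flatMap]
    simp [linesFold]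

theorem linesSpec_cons (buf cs : List Char) (h : '\n' ∉ buf) :
    linesSpec (buf ++ '\n' :: cs) = buf :: linesSpec cs := by
  unfold linesSpec
  rw [pySplit_cons_sep _ _ h]
  rcases hP : pySplit cs with _ | ⟨p, ps⟩
  · exact absurd hP (pySplit_ne_nil cs)
  · simp only [List.getLastD_cons]
    split_ifs <;> simp

theorem bSide (cs : List Char) (out : List (List Char)) (buf : List Char) (th fi : Bool)
    (h : '\n' ∉ buf) :
    (if (cs.foldl pvBStep (out, buf, th, fi)).2.1.isEmpty then
        (cs.foldl pvBStep (out, buf, th, fi)).1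
      else
        (cs.foldl pvBStep (out, buf, th, fi)).1 ++
          (pvBFlush (cs.foldl pvBStep (out, buf, th, fi)).2.2.1
            (cs.foldl pvBStep (out, buf, th, fi)).2.2.2
            (cs.foldl pvBStep (out, buf, th, fi)).2.1).1) =
      (linesFold (out, th, fi) (linesSpec (buf ++ cs))).1 := by
  induction cs generalizing out buf th fi with
  | nil =>
    rcases hb : buf with _ | ⟨b, bs⟩
    · simp [linesSpec, pySplit, linesFold]
    · rw [← hb]
      have hbne : buf ≠ [] := by simp [hb]
      have hsp : pySplit buf = [buf] := pySplit_no_nl h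
      simp only [List.foldl_nil, List.append_nil, linesSpec, hsp]
      simp [List.getLastD, hb, linesFold]
  | cons c cs ih =>
    by_cases hc : c = '\n'
    · subst hc
      have hstep : pvBStep (out, buf, th, fi) '\n'
          = (out ++ (pvBFlush th fi buf).1, [], (pvBFlush th fi buf).2, false) := by
        simp [pvBStep]
      rw [List.foldl_cons, hstep, ih _ _ _ _ (by simp),
        linesSpec_cons _ _ h]
      simp [linesFold]
    · have hstep : pvBStep (out, buf, th, fi) c = (out, buf ++ [c], th, fi) := by
        simp [pvBStep, hc]
      rw [List.foldl_cons, hstep, ih _ _ _ _ (by simp [h]; exact fun e => hc e.symm), List.append_assoc]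
      rfl

-- ===== VERDICT (by name: the statement is the Claim_ definition above) =====
theorem skipThinking_spec : Claim_equal_skipThinking := by
  intro parts _
  unfold Spec_skipThinking
  simp only [skipThinking, skipThinking_alt]
  rw [aSide, pvAChunks_spec]
  have hB : parts.foldl (fun st part => part.toList.foldl pvBStep st) ([], [], false, true)
      = ((parts.map String.toList).flatten).foldl pvBStep ([], [], false, true) := by
    rw [List.foldl_flatten, List.foldl_map]
  rw [hB]
  have hb := bSide ((parts.map String.toList).flatten) [] [] false true (by simp)
  simp only [List.nil_append] at hb
  rw [hb]
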